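-- pv_equiv track=rewrite | github.com/karishmatank/ls-core | py-110/small_problems/easy_5/staggered_case_2.py | staggered_case
-- ===== SOURCE A (Python) =====
-- def staggered_case(text):
--     staggered = ""
--     last_alpha = ""
--     for char in text:
--         if not char.isalpha():
--             staggered += char
--             continue
--
--         if not last_alpha or last_alpha.islower():
--             new_char = char.upper()
--         else:
--             new_char = char.lower()
--
--         staggered += new_char
--         last_alpha = new_char
--
--     return staggered
-- ===== SOURCE B (Python) =====
-- def staggered_case(text):
--     letters = [c for c in text if c.isalpha()]
--     transformed = [c.upper() if i % 2 == 0 else c.lower()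
--                    for i, c in enumerate(letters)]
--     it = iter(transformed)
--     return "".join(next(it) if c.isalpha() else c for c in text)
-- ===== Notes on version B (the rewrite author's own statement) =====
-- stated objective: alternative
-- what changed: Replaces A's per-character last_alpha state machine with an extract-transform-reassemble pipeline: collect the alphabetic characters, case them by index parity (even=upper), then rebuild the string consuming one transformed letter per alpha position.
import Mathlib
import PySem

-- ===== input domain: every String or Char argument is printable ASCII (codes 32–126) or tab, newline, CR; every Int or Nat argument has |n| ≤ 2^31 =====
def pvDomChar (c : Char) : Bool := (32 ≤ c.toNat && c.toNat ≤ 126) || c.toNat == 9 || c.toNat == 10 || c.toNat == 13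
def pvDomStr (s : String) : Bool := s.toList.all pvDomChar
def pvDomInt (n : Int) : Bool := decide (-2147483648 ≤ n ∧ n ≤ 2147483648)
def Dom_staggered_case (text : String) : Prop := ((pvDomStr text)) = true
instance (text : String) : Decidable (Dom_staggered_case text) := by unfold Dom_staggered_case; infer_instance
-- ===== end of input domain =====

-- B replaces A's last_alpha state machine by an extract-transform-reassemble pipeline
-- (case the alphabetic chars by index parity, then splice them back); alternative decomposition, same cost.


-- ===== PORT A =====
-- A's last_alpha is "" or the single previously produced letter; ported as Option Char
-- (none = "", and ''.islower() is False only through the `not last_alpha` disjunct, kept in order).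
def staggeredLoopA : List Char → List Char → Option Char → List Char
  | [], staggered, _ => staggered
  | char :: rest, staggered, last_alpha =>
    if !PySem.Chars.isalpha char then
      staggeredLoopA rest (staggered ++ [char]) last_alpha
    else
      let new_char :=
        if (match last_alpha with
            | none => true
            | some l => PySem.Chars.islower l) then PySem.Chars.upperChar char
        else PySem.Chars.lowerChar char
      staggeredLoopA rest (staggered ++ [new_char]) (some new_char)

def staggered_case (text : String) : String :=
  String.mk (staggeredLoopA text.toList [] none)

-- ===== PORT B =====
-- "".join(next(it) if c.isalpha() else c for c in text): consume one transformed letter per alpha char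
def consumeB : List Char → List Char → List Char
  | [], _ => []
  | c :: rest, it =>
    if PySem.Chars.isalpha c then
      match it with
      | t :: it' => t :: consumeB rest it'
      | [] => []          -- next() on an exhausted iterator; unreachable (one letter per alpha char)
    else c :: consumeB rest it

def staggered_case_alt (text : String) : String :=
  let letters := text.toList.filter PySem.Chars.isalpha
  let transformed := (PySem.List.enumerate letters).map
    (fun p => if p.1 % 2 == 0 then PySem.Chars.upperChar p.2 else PySem.Chars.lowerChar p.2)
  String.mk (consumeB text.toList transformed)

-- ===== PRECONDITION & SPEC =====
def Spec_staggered_case (text : String) (out : String) : Prop := out = staggered_case_alt text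
instance (text : String) (out : String) : Decidable (Spec_staggered_case text out) := by unfold Spec_staggered_case; infer_instance

-- ===== CLAIM (what is proved, stated in full; the proofs are below) =====
def Claim_equal_staggered_case : Prop := ∀ (text : String), Dom_staggered_case text → Spec_staggered_case text (staggered_case text)

-- ===== LEMMAS AND PROOFS =====

theorem char_le_toNat (a b : Char) : (a ≤ b) ↔ a.toNat ≤ b.toNat := by
  rw [Char.le_def]; exact UInt32.le_iff_toNat_le ..

theorem islower_toNat (c : Char) : PySem.Chars.islower c = decide (97 ≤ c.toNat ∧ c.toNat ≤ 122) := by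
  simp [PySem.Chars.islower, char_le_toNat]

theorem isupper_toNat (c : Char) : PySem.Chars.isupper c = decide (65 ≤ c.toNat ∧ c.toNat ≤ 90) := by
  simp [PySem.Chars.isupper, char_le_toNat]

-- casing an alphabetic char fixes its islower flag
theorem char_case (c : Char) (h : PySem.Chars.isalpha c = true) :
    PySem.Chars.islower (PySem.Chars.upperChar c) = false ∧
    PySem.Chars.islower (PySem.Chars.lowerChar c) = true := by
  simp only [PySem.Chars.isalpha, Bool.or_eq_true, islower_toNat, isupper_toNat,
    decide_eq_true_eq] at h
  simp only [PySem.Chars.upperChar, PySem.Chars.lowerChar, islower_toNat, isupper_toNat,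
    decide_eq_true_eq]
  split_ifs with h1 h2 <;>
    simp only [Char.toNat_ofNat, Nat.isValidChar, decide_eq_false_iff_not] <;>
    first | (split_ifs <;> omega) | omega

-- A's `not last_alpha or last_alpha.islower()` as a Bool on the Option state
def condA : Option Char → Bool
  | none => true
  | some l => PySem.Chars.islower l

def newChar (la : Option Char) (c : Char) : Char :=
  if condA la then PySem.Chars.upperChar c else PySem.Chars.lowerChar c

theorem loopA_cons (c : Char) (rest st : List Char) (la : Option Char) :
    staggeredLoopA (c :: rest) st la =
      if PySem.Chars.isalpha c then
        staggeredLoopA rest (st ++ [newChar la c]) (some (newChar la c))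
      else staggeredLoopA rest (st ++ [c]) la := by
  cases la <;> by_cases h : PySem.Chars.isalpha c = true <;>
    simp [staggeredLoopA, h, newChar, condA] <;> try rfl

theorem loopA_acc (cs : List Char) : ∀ (acc : List Char) (la : Option Char),
    staggeredLoopA cs acc la = acc ++ staggeredLoopA cs [] la := by
  induction cs with
  | nil => intro acc la; simp [staggeredLoopA]
  | cons c rest ih =>
    intro acc la
    rw [loopA_cons, loopA_cons]
    by_cases h : PySem.Chars.isalpha c = true <;>
      · simp only [h, if_true, if_false, Bool.false_eq_true]
        rw [ih, ih (([] : List Char) ++ _)]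
        simp

theorem main_inv (cs : List Char) : ∀ (k : Int) (la : Option Char), 0 ≤ k →
    condA la = decide (k % 2 = 0) →
    staggeredLoopA cs [] la =
      consumeB cs ((PySem.List.enumerate (cs.filter PySem.Chars.isalpha) k).map
        (fun p => if p.1 % 2 == 0 then PySem.Chars.upperChar p.2 else PySem.Chars.lowerChar p.2)) := by
  induction cs with
  | nil => intro k la _ _; simp [staggeredLoopA, consumeB]
  | cons c rest ih =>
    intro k la hk hla
    rw [loopA_cons]
    by_cases h : PySem.Chars.isalpha c = true
    · simp only [h, if_true, List.filter_cons_of_pos h, PySem.List.enumerate_cons,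
        List.map_cons, consumeB]
      rw [loopA_acc]
      have hnc : newChar la c =
          (if (k % 2 == 0) = true then PySem.Chars.upperChar c
           else PySem.Chars.lowerChar c) := by
        by_cases hm : k % 2 = 0 <;> simp [newChar, hla, hm]
      rw [hnc]
      have hc := char_case c h
      have hla' : condA (some (if (k % 2 == 0) = true then PySem.Chars.upperChar c
          else PySem.Chars.lowerChar c)) = decide ((k + 1) % 2 = 0) := by
        by_cases hm : k % 2 = 0
        · have h1 : (k % 2 == 0) = true := by simp [hm]
          simp [condA, h1, hc.1, show ¬ ((k + 1) % 2 = 0) by omega]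
        · have h1 : (k % 2 == 0) = false := by simp [hm]
          simp [condA, h1, hc.2, show (k + 1) % 2 = 0 by omega]
      rw [ih (k + 1) _ (by omega) hla']
      simp
    · have h' : PySem.Chars.isalpha c = false := by simpa using h
      simp only [h', Bool.false_eq_true, if_false, List.filter_cons_of_neg (by simpa using h),
        consumeB]
      rw [loopA_acc, ih k la hk hla]
      simp

-- ===== VERDICT (by name: the statement is the Claim_ definition above) =====
theorem staggered_case_spec : Claim_equal_staggered_case := by
  intro text _
  unfold Spec_staggered_case staggered_case staggered_case_alt
  congr 1
  exact main_inv text.toList 0 none (by omega) (by simp [condA])
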